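-- pv_equiv track=rewrite | github.com/anorbert-cmyk/AutoCognitix | scripts/import_dtcdb.py | get_subcategory
-- ===== SOURCE A (Python) =====
-- from typing import Optional
--
-- CATEGORY_NAMES = {
--     "P": "Powertrain",
--     "C": "Chassis",
--     "B": "Body",
--     "U": "Network",
-- }
--
-- P_SUBCATEGORIES = {
--     (0, 99): "Fuel and Air Metering",
--     (100, 199): "Fuel and Air Metering",
--     (200, 299): "Fuel and Air Metering (Injector Circuit)",
--     (300, 399): "Ignition System or Misfire",
--     (400, 499): "Auxiliary Emissions Controls",
--     (500, 599): "Vehicle Speed and Idle Control",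
--     (600, 699): "Computer Output Circuit",
--     (700, 899): "Transmission",
--     (900, 999): "Transmission",
--     (1000, 9999): "Manufacturer Specific",
-- }
--
-- def get_subcategory(code: str, parsed_subcategory: Optional[str] = None) -> str:
--     """Get the subcategory based on DTC code range."""
--     if parsed_subcategory:
--         return parsed_subcategory
--
--     if not code or len(code) < 5:
--         return ""
--
--     prefix = code[0].upper()
--
--     # Only P codes have detailed subcategory ranges
--     if prefix != "P":
--         return CATEGORY_NAMES.get(prefix, "")
--
--     try:
--         # Extract numeric part (e.g., P0100 -> 100)
--         num = int(code[1:5], 16) if code[1].upper() in "ABCDEF" else int(code[1:5])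
--
--         for (start, end), subcategory in P_SUBCATEGORIES.items():
--             if start <= num <= end:
--                 return subcategory
--     except ValueError:
--         pass
--
--     return "Powertrain"
-- ===== SOURCE B (Python) =====
-- from typing import Optional
--
-- CATEGORY_NAMES = {
--     "P": "Powertrain",
--     "C": "Chassis",
--     "B": "Body",
--     "U": "Network",
-- }
--
-- # One bucket per hundred for P0000-P0999; direct index instead of a range scan.
-- BUCKETS = [
--     "Fuel and Air Metering",
--     "Fuel and Air Metering",
--     "Fuel and Air Metering (Injector Circuit)",
--     "Ignition System or Misfire",
--     "Auxiliary Emissions Controls",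
--     "Vehicle Speed and Idle Control",
--     "Computer Output Circuit",
--     "Transmission",
--     "Transmission",
--     "Transmission",
-- ]
--
-- def get_subcategory(code: str, parsed_subcategory: Optional[str] = None) -> str:
--     """Get the subcategory based on DTC code range."""
--     if parsed_subcategory:
--         return parsed_subcategory
--
--     if not code or len(code) < 5:
--         return ""
--
--     prefix = code[0].upper()
--     if prefix != "P":
--         return CATEGORY_NAMES.get(prefix, "")
--
--     try:
--         num = int(code[1:5], 16) if code[1].upper() in "ABCDEF" else int(code[1:5])
--     except ValueError:
--         return "Powertrain"
--
--     if 0 <= num <= 999: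
--         return BUCKETS[num // 100]
--     if 1000 <= num <= 9999:
--         return "Manufacturer Specific"
--     return "Powertrain"
-- ===== Notes on version B (the rewrite author's own statement) =====
-- stated objective: simpler
-- what changed: The linear scan over the P_SUBCATEGORIES range table is replaced by direct arithmetic indexing (num//100) into a 10-element bucket list plus two bound checks, and the try/except parse is restructured as an early return.
import Mathlib
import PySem

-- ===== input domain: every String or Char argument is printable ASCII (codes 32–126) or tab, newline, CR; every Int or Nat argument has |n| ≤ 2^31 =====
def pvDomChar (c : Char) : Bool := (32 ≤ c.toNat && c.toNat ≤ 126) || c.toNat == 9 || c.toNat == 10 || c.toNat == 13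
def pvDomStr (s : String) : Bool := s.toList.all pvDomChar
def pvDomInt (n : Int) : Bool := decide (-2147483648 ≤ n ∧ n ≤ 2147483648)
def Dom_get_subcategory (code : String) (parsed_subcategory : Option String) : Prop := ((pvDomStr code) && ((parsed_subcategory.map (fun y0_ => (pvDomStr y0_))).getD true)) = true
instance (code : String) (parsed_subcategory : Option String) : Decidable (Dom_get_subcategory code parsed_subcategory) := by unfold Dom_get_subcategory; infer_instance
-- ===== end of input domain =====

-- B replaces A's linear range-table scan by direct arithmetic bucket indexing (num // 100); same guards and parsing.

-- ===== PORT A =====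
def pvCategoryNames : PySem.Dict String String :=
  (((PySem.Dict.empty.insert "P" "Powertrain").insert "C" "Chassis").insert "B" "Body").insert "U" "Network"

def pvPSubcategories : List ((Int × Int) × String) :=
  [((0, 99), "Fuel and Air Metering"),
   ((100, 199), "Fuel and Air Metering"),
   ((200, 299), "Fuel and Air Metering (Injector Circuit)"),
   ((300, 399), "Ignition System or Misfire"),
   ((400, 499), "Auxiliary Emissions Controls"),
   ((500, 599), "Vehicle Speed and Idle Control"),
   ((600, 699), "Computer Output Circuit"),
   ((700, 899), "Transmission"),
   ((900, 999), "Transmission"),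
   ((1000, 9999), "Manufacturer Specific")]

-- A's 'for (start, end), subcategory in P_SUBCATEGORIES.items(): if start <= num <= end: return subcategory'
def pvScan (table : List ((Int × Int) × String)) (num : Int) : Option String :=
  match table with
  | [] => none
  | ((s, e), sub) :: rest => if s ≤ num ∧ num ≤ e then some sub else pvScan rest num

def get_subcategory (code : String) (parsed_subcategory : Option String) : String :=
  -- 'if parsed_subcategory:' — truthy iff present and non-empty
  if parsed_subcategory.getD "" ≠ "" then parsed_subcategory.getD ""
  else
    let cs := code.toList
    -- 'if not code or len(code) < 5' — emptiness is subsumed by len < 5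
    if cs.length < 5 then ""
    else
      match cs with
      | c0 :: c1 :: _ =>
        let pfx := PySem.Chars.upper [c0]          -- code[0].upper()
        if pfx ≠ ['P'] then pvCategoryNames.getD (String.ofList pfx) ""
        else
          -- int(code[1:5], 16) if code[1].upper() in "ABCDEF" else int(code[1:5]); ValueError → "Powertrain"
          let num? := if PySem.Chars.isIn (PySem.Chars.upper [c1]) "ABCDEF".toList
                      then PySem.Int.ofCharsBase? (PySem.Chars.slice cs (some 1) (some 5)) 16
                      else PySem.Int.ofChars? (PySem.Chars.slice cs (some 1) (some 5))
          match num? with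
          | none => "Powertrain"
          | some num =>
            match pvScan pvPSubcategories num with
            | some sub => sub
            | none => "Powertrain"
      | _ => ""   -- unreachable: cs.length ≥ 5 here

-- ===== PORT B =====
def pvCategoryNamesB : PySem.Dict String String :=
  (((PySem.Dict.empty.insert "P" "Powertrain").insert "C" "Chassis").insert "B" "Body").insert "U" "Network"

def pvBuckets : List String :=
  ["Fuel and Air Metering",
   "Fuel and Air Metering",
   "Fuel and Air Metering (Injector Circuit)",
   "Ignition System or Misfire",
   "Auxiliary Emissions Controls",
   "Vehicle Speed and Idle Control",
   "Computer Output Circuit",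
   "Transmission",
   "Transmission",
   "Transmission"]

def get_subcategory_alt (code : String) (parsed_subcategory : Option String) : String :=
  if parsed_subcategory.getD "" ≠ "" then parsed_subcategory.getD ""
  else
    let cs := code.toList
    if cs.length < 5 then ""
    else
      match cs with
      | [] => ""        -- unreachable: cs.length ≥ 5 here
      | c0 :: rest =>
        match rest with
        | [] => ""      -- unreachable likewise
        | c1 :: _ =>
          let pfx := PySem.Chars.upper [c0]
          if pfx ≠ ['P'] then pvCategoryNamesB.getD (String.ofList pfx) ""
          else
            let num? := if PySem.Chars.isIn (PySem.Chars.upper [c1]) "ABCDEF".toList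
                        then PySem.Int.ofCharsBase? (PySem.Chars.slice cs (some 1) (some 5)) 16
                        else PySem.Int.ofChars? (PySem.Chars.slice cs (some 1) (some 5))
            match num? with
            | some num =>
              if 0 ≤ num ∧ num ≤ 999 then
                -- BUCKETS[num // 100]: index is in range under the guard, so the default is never used
                PySem.List.pyGetD pvBuckets (PySem.Int.floordiv num 100) ""
              else if 1000 ≤ num ∧ num ≤ 9999 then "Manufacturer Specific"
              else "Powertrain"
            | none => "Powertrain"

-- ===== PRECONDITION & SPEC =====
def Spec_get_subcategory (code : String) (parsed_subcategory : Option String) (out : String) : Prop := out = get_subcategory_alt code parsed_subcategory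
instance (code : String) (parsed_subcategory : Option String) (out : String) : Decidable (Spec_get_subcategory code parsed_subcategory out) := by unfold Spec_get_subcategory; infer_instance

-- ===== CLAIM (what is proved, stated in full; the proofs are below) =====
def Claim_equal_get_subcategory : Prop := ∀ (code : String) (parsed_subcategory : Option String), Dom_get_subcategory code parsed_subcategory → Spec_get_subcategory code parsed_subcategory (get_subcategory code parsed_subcategory)

-- ===== LEMMAS AND PROOFS =====

-- the table scan agrees with the arithmetic bucket lookup on every Int
lemma pvScan_eq_buckets (num : Int) :
    (match pvScan pvPSubcategories num with | some sub => sub | none => "Powertrain") =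
      (if 0 ≤ num ∧ num ≤ 999 then PySem.List.pyGetD pvBuckets (PySem.Int.floordiv num 100) ""
       else if 1000 ≤ num ∧ num ≤ 9999 then "Manufacturer Specific"
       else "Powertrain") := by
  have hdiv : ∀ k : Int, k * 100 ≤ num → num < (k + 1) * 100 → PySem.Int.floordiv num 100 = k :=
    fun k h1 h2 => (PySem.Int.floordiv_eq_iff_of_pos (by norm_num)).mpr ⟨h1, h2⟩
  simp only [pvScan, pvPSubcategories]
  split_ifs with h1 h2 h3 h4 h5 h6 h7 h8 h9 h10 <;>
    first
      | (rw [hdiv 0 (by omega) (by omega)]; decide)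
      | (rw [hdiv 1 (by omega) (by omega)]; decide)
      | (rw [hdiv 2 (by omega) (by omega)]; decide)
      | (rw [hdiv 3 (by omega) (by omega)]; decide)
      | (rw [hdiv 4 (by omega) (by omega)]; decide)
      | (rw [hdiv 5 (by omega) (by omega)]; decide)
      | (rw [hdiv 6 (by omega) (by omega)]; decide)
      | (rw [hdiv 7 (by omega) (by omega)]; decide)
      | (rw [hdiv 8 (by omega) (by omega)]; decide)
      | (rw [hdiv 9 (by omega) (by omega)]; decide)
      | (rcases (by omega : num ≤ 799 ∨ 800 ≤ num) with h' | h' <;>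
           first
             | (rw [hdiv 7 (by omega) (by omega)]; decide)
             | (rw [hdiv 8 (by omega) (by omega)]; decide))
      | rfl
      | omega

-- ===== VERDICT (by name: the statement is the Claim_ definition above) =====
theorem get_subcategory_spec : Claim_equal_get_subcategory := by
  intro code parsed_subcategory _
  unfold Spec_get_subcategory get_subcategory get_subcategory_alt
  split
  · rfl
  · dsimp only
    split
    · rfl
    · cases hcs : code.toList with
      | nil => rfl
      | cons c0 rest =>
        cases rest with
        | nil => rfl
        | cons c1 tail =>
          dsimp only
          split
          · rfl
          · split
            · rename_i heq
              rw [heq]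
            · rename_i num heq
              rw [heq]
              exact pvScan_eq_buckets num
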